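-- pv_equiv track=rewrite | github.com/mcxenonik/Python_DijkstraAlgorithm | main.py | prepare_result
-- ===== SOURCE A (Python) =====
-- def prepare_result(table, table_width, shortest_path):
--     result = ""
--     for id in range(len(table)):
--         if (id in shortest_path):
--             result += str(table[id])
--         else:
--             result += " "
--
--         if ((id + 1) % table_width == 0):
--             result += "\n"
--
--     return result
-- ===== SOURCE B (Python) =====
-- def prepare_result(table, table_width, shortest_path):
--     on_path = set(shortest_path)
--     cells = [str(v) if i in on_path else " " for i, v in enumerate(table)]
--     parts = []
--     for r in range(0, len(cells), table_width):
--         row = cells[r:r + table_width]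
--         parts.append("".join(row))
--         if len(row) == table_width:
--             parts.append("\n")
--     return "".join(parts)
-- ===== Notes on version B (the rewrite author's own statement) =====
-- stated objective: faster
-- what changed: Replaces the flat loop (linear `id in shortest_path` scan per cell, repeated string += and per-id modular newline test) by a two-phase pass: build the cell-string list once with set membership, then slice it into rows of table_width cells, joining rows and appending a newline only after complete rows; …
-- outside the precondition, e.g. on prepare_result([1, 2], -1, [0]): A returns '1\n \n', B returns ''; on prepare_result([], 0, []): A returns '', B raises ValueError
import Mathlib
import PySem

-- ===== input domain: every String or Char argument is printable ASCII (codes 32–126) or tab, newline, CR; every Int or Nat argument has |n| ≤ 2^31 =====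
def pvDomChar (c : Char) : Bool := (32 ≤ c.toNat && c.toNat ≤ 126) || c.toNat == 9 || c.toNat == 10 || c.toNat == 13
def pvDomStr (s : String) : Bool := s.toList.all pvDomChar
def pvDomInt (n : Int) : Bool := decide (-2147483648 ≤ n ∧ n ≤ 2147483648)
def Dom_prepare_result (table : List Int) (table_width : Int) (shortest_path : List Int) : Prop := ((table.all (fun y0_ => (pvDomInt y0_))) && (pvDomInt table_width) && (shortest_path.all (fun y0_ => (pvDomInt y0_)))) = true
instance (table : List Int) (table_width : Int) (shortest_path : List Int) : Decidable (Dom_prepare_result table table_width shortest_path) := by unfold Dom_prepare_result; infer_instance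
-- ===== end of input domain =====

-- B replaces A's flat loop + per-id modular newline test by building the cell strings once and
-- slicing them into rows of table_width cells (asymptotically faster: no per-cell list scan, no quadratic string +=).

-- ===== PORT A =====
-- result accumulated as List Char (PySem convention for exact string building), returned as String
def prepare_result (table : List Int) (table_width : Int) (shortest_path : List Int) : String :=
  let res : List Char :=
    (PySem.List.pyRange 0 (PySem.List.len table) 1).foldl (fun result id =>
      let result := if id ∈ shortest_path
        then result ++ PySem.Int.toChars (PySem.List.pyGetD table id 0)
        else result ++ [' ']
      if PySem.Int.mod (id + 1) table_width = 0 then result ++ ['\n'] else result) []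
  String.ofList res

-- ===== PORT B =====
def prepare_result_alt (table : List Int) (table_width : Int) (shortest_path : List Int) : String :=
  let on_path : PySem.Set Int := PySem.Set.ofList shortest_path
  let cells : List (List Char) := (PySem.List.enumerate table).map
    (fun p => if p.1 ∈ on_path then PySem.Int.toChars p.2 else [' '])
  let parts : List (List Char) :=
    (PySem.List.pyRange 0 (PySem.List.len cells) table_width).foldl (fun parts r =>
      let row := PySem.List.slice cells (some r) (some (r + table_width))
      let parts := parts ++ [row.flatten]
      if (row.length : Int) = table_width then parts ++ [['\n']] else parts) []
  String.ofList parts.flatten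

-- ===== PRECONDITION & SPEC =====
-- Pre_ keeps the natural grid-printing domain: a positive width (plus the trivially empty table with
-- any nonzero width, where both programs return ""). Excluded: width 0, where A raises ZeroDivisionError
-- on a nonempty table (and B's range(..., 0) raises ValueError even on an empty one), and negative
-- widths, outside the natural domain, where A's newline placement is an artefact of Python's negative
-- modulo and B naturally produces no rows.
def Pre_prepare_result (table : List Int) (table_width : Int) (shortest_path : List Int) : Prop :=
  0 < table_width ∨ (table = [] ∧ table_width ≠ 0)
instance (table : List Int) (table_width : Int) (shortest_path : List Int) : Decidable (Pre_prepare_result table table_width shortest_path) := by unfold Pre_prepare_result; infer_instance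

def pvWitness_prepare_result : List Int × Int × List Int := ([4, 8, 15, 16, 23, 42], 3, [0, 2, 3])

def Spec_prepare_result (table : List Int) (table_width : Int) (shortest_path : List Int) (out : String) : Prop := out = prepare_result_alt table table_width shortest_path
instance (table : List Int) (table_width : Int) (shortest_path : List Int) (out : String) : Decidable (Spec_prepare_result table table_width shortest_path out) := by unfold Spec_prepare_result; infer_instance

-- ===== CLAIM (what is proved, stated in full; the proofs are below) =====
def Claim_equal_prepare_result : Prop := ∀ (table : List Int) (table_width : Int) (shortest_path : List Int), Dom_prepare_result table table_width shortest_path → Pre_prepare_result table table_width shortest_path → Spec_prepare_result table table_width shortest_path (prepare_result table table_width shortest_path)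

-- ===== LEMMAS AND PROOFS =====
def pvRows (w : Nat) (cs : List (List Char)) : List Char :=
  if _h : w = 0 ∨ cs.length < w then cs.flatten
  else (cs.take w).flatten ++ '\n' :: pvRows w (cs.drop w)
termination_by cs.length
decreasing_by simp; omega

theorem pvRows_small {w : Nat} {cs : List (List Char)} (h : cs.length < w) :
    pvRows w cs = cs.flatten := by
  rw [pvRows]; simp [h]

theorem pvRows_big {w : Nat} {cs : List (List Char)} (hw : w ≠ 0) (h : w ≤ cs.length) :
    pvRows w cs = (cs.take w).flatten ++ '\n' :: pvRows w (cs.drop w) := by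
  rw [pvRows]
  have : ¬ (w = 0 ∨ cs.length < w) := by omega
  simp [this]

theorem pvRange_pos_cons (a b s : Int) (hs : 0 < s) (hab : a < b) :
    PySem.List.pyRange a b s = a :: PySem.List.pyRange (a + s) b s := by
  rw [PySem.List.pyRange_of_pos _ _ hs, PySem.List.pyRange_of_pos _ _ hs]
  have h1 : b - a + s - 1 = (b - a - 1) + 1 * s := by ring
  have h2 : (b - a + s - 1) / s = (b - a - 1) / s + 1 := by
    rw [h1, Int.add_mul_ediv_right _ _ (by omega)]
  have hnn : 0 ≤ (b - a - 1) / s := Int.ediv_nonneg (by omega) (by omega)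
  rw [if_pos hab, h2]
  have htn : ((b - a - 1) / s + 1).toNat = ((b - a - 1) / s).toNat + 1 := by omega
  rw [htn, List.range_succ_eq_map, List.map_cons]
  simp only [Nat.cast_zero, mul_zero, add_zero, List.map_map]
  congr 1
  by_cases hab2 : a + s < b
  · rw [if_pos hab2]
    have : b - (a + s) + s - 1 = b - a - 1 := by ring
    rw [this]
    apply List.map_congr_left
    intro k _
    simp [Function.comp]
    ring
  · rw [if_neg hab2]
    have : (b - a - 1) / s = 0 := Int.ediv_eq_zero_of_lt (by omega) (by omega)
    simp [this]

theorem pvA_rows (tw : Int) (htw : tw ≠ 0) (sp : List Int) :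
    ∀ (n : Nat) (t : List Int) (s : Int), t.length = n → 0 ≤ s → tw ∣ s →
    (PySem.List.enumerate t s).flatMap (fun p =>
        (if p.1 ∈ sp then PySem.Int.toChars p.2 else [' ']) ++
        (if PySem.Int.mod (p.1 + 1) tw = 0 then ['\n'] else [])) =
    pvRows tw.natAbs ((PySem.List.enumerate t s).map
        (fun p => if p.1 ∈ sp then PySem.Int.toChars p.2 else [' '])) := by
  intro n
  induction n using Nat.strong_induction_on with
  | _ n ih =>
  intro t s hlen hs hdvd
  set W := tw.natAbs with hWdef
  have hW : 0 < W := Int.natAbs_pos.mpr htw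
  have hdvdW : tw ∣ (W : Int) := Int.dvd_natAbs.mpr dvd_rfl
  -- no-newline fact for small offsets
  have hnonl : ∀ (k : Nat), 0 < k → k < W → ¬ PySem.Int.mod (s + k) tw = 0 := by
    intro k hk1 hk2 hmod
    rw [PySem.Int.mod_eq_zero_iff_dvd] at hmod
    have h1 : tw ∣ (k : Int) := (Int.dvd_add_right hdvd).mp hmod
    have h2 : (W : Int) ∣ (k : Int) := (Int.natAbs_dvd).mpr h1
    have h3 : W ∣ k := Int.natCast_dvd_natCast.mp h2
    have := Nat.le_of_dvd hk1 h3
    omega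
  by_cases hsmall : n < W
  · -- partial (or empty) row: no newline ever fires
    rw [pvRows_small (by simp [PySem.List.length_enumerate, hlen]; omega)]
    rw [List.flatMap_def]
    congr 1
    apply List.map_congr_left
    intro p hp
    rw [PySem.List.mem_enumerate_iff] at hp
    obtain ⟨k, hk, rfl⟩ := hp
    have : ¬ PySem.Int.mod (s + k + 1) tw = 0 := by
      have := hnonl (k + 1) (by omega) (by omega)
      simpa [add_assoc] using this
    simp [this]
  · -- full first row
    have hWn : W ≤ n := by omega
    have htne : t ≠ [] := by intro h; subst h; simp at hlen; omega
    set A := t.take W with hA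
    set B := t.drop W with hB
    have hAlen : A.length = W := by simp [hA, hlen]; omega
    have hAne : A ≠ [] := by intro h; rw [h] at hAlen; simp at hAlen; omega
    set I := A.dropLast with hI
    set x := A.getLast hAne with hx
    have hIx : I ++ [x] = A := A.dropLast_append_getLast hAne
    have hIlen : I.length = W - 1 := by simp [hI, hAlen]
    have htAB : t = A ++ B := (List.take_append_drop W t).symm
    -- expand the enumerate
    rw [htAB, PySem.List.enumerate_append, ← hIx, PySem.List.enumerate_append]
    have henumI : ∀ p ∈ PySem.List.enumerate I s,
        ((if p.1 ∈ sp then PySem.Int.toChars p.2 else [' ']) ++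
         (if PySem.Int.mod (p.1 + 1) tw = 0 then ['\n'] else [])) =
        ((if p.1 ∈ sp then PySem.Int.toChars p.2 else [' ']) ++ []) := by
      intro p hp
      rw [PySem.List.mem_enumerate_iff] at hp
      obtain ⟨k, hk, rfl⟩ := hp
      have : ¬ PySem.Int.mod (s + k + 1) tw = 0 := by
        have := hnonl (k + 1) (by omega) (by simp [hIlen] at hk; omega)
        simpa [add_assoc] using this
      simp [this]
    have henumX : PySem.Int.mod ((s + I.length) + 1) tw = 0 := by
      rw [PySem.Int.mod_eq_zero_iff_dvd]
      have : (s + I.length) + 1 = s + W := by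
        rw [hIlen]; omega
      rw [this]
      exact dvd_add hdvd hdvdW
    -- RHS row shape
    rw [List.flatMap_append, List.flatMap_append]
    rw [List.map_append, List.map_append]
    have hmapIlen : ((PySem.List.enumerate I s).map
        (fun p => if p.1 ∈ sp then PySem.Int.toChars p.2 else [' '])).length = W - 1 := by
      simp [PySem.List.length_enumerate, hIlen]
    rw [pvRows_big (by omega) (by simp [PySem.List.length_enumerate, hIlen, hB, hlen]; omega)]
    have hsingle : PySem.List.enumerate [x] (s + (I.length : Int)) = [((s + (I.length : Int)), x)] := by
      simp [PySem.List.enumerate]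
    rw [hsingle]
    have hlen2 : (I ++ [x]).length = W := by simp [hIlen]; omega
    rw [hlen2]
    have hflatI : List.flatMap
        (fun p => (if p.1 ∈ sp then PySem.Int.toChars p.2 else [' ']) ++
          if PySem.Int.mod (p.1 + 1) tw = 0 then ['\n'] else [])
        (PySem.List.enumerate I s) =
        (List.map (fun p => if p.1 ∈ sp then PySem.Int.toChars p.2 else [' '])
          (PySem.List.enumerate I s)).flatten := by
      rw [List.flatMap_def]
      congr 1
      apply List.map_congr_left
      intro p hp
      rw [henumI p hp, List.append_nil]
    rw [hflatI]
    have hBlen : B.length = n - W := by simp [hB, hlen]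
    have ihB := ih (n - W) (by omega) B (s + (W : Int)) hBlen (by omega)
      (dvd_add hdvd hdvdW)
    rw [ihB]
    have htake : List.take W
        (List.map (fun p => if p.1 ∈ sp then PySem.Int.toChars p.2 else [' ']) (PySem.List.enumerate I s) ++
            List.map (fun p => if p.1 ∈ sp then PySem.Int.toChars p.2 else [' ']) [(s + (I.length : Int), x)] ++
          List.map (fun p => if p.1 ∈ sp then PySem.Int.toChars p.2 else [' ']) (PySem.List.enumerate B (s + (W : Int)))) =
        List.map (fun p => if p.1 ∈ sp then PySem.Int.toChars p.2 else [' ']) (PySem.List.enumerate I s) ++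
            List.map (fun p => if p.1 ∈ sp then PySem.Int.toChars p.2 else [' ']) [(s + (I.length : Int), x)] := by
      apply List.take_left'
      simp [PySem.List.length_enumerate, hIlen]; omega
    have hdrop : List.drop W
        (List.map (fun p => if p.1 ∈ sp then PySem.Int.toChars p.2 else [' ']) (PySem.List.enumerate I s) ++
            List.map (fun p => if p.1 ∈ sp then PySem.Int.toChars p.2 else [' ']) [(s + (I.length : Int), x)] ++
          List.map (fun p => if p.1 ∈ sp then PySem.Int.toChars p.2 else [' ']) (PySem.List.enumerate B (s + (W : Int)))) =
        List.map (fun p => if p.1 ∈ sp then PySem.Int.toChars p.2 else [' ']) (PySem.List.enumerate B (s + (W : Int))) := by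
      apply List.drop_left'
      simp [PySem.List.length_enumerate, hIlen]; omega
    rw [htake, hdrop]
    simp [henumX, List.flatten_append, List.append_assoc]

theorem pvB_rows (w : Nat) (hw : 0 < w) (full : List (List Char)) :
    ∀ (n : Nat) (cs : List (List Char)) (s : Nat) (acc : List (List Char)),
    cs.length = n → full.drop s = cs →
    ((PySem.List.pyRange (s : Int) ((full.length : Nat) : Int) (w : Int)).foldl (fun parts r =>
        let row := PySem.List.slice full (some r) (some (r + (w : Int)))
        let parts := parts ++ [row.flatten]
        if (row.length : Int) = (w : Int) then parts ++ [['\n']] else parts) acc).flatten =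
    acc.flatten ++ pvRows w cs := by
  intro n
  induction n using Nat.strong_induction_on with
  | _ n ih =>
  intro cs s acc hn hdrop
  by_cases hsl : full.length ≤ s
  · -- empty range, cs = []
    have hnil : PySem.List.pyRange (s : Int) (full.length : Int) (w : Int) = [] := by
      rw [PySem.List.pyRange_of_pos _ _ (by exact_mod_cast hw)]
      rw [if_neg (by exact_mod_cast not_lt.mpr (Int.ofNat_le.mpr hsl))]
      simp
    have hcs : cs = [] := by rw [← hdrop, List.drop_eq_nil_iff.mpr hsl]
    rw [hnil, hcs, pvRows_small (show (([] : List (List Char))).length < w from by simpa using hw)]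
    simp
  · push_neg at hsl
    have hcons := pvRange_pos_cons (s : Int) (full.length : Int) (w : Int)
      (by exact_mod_cast hw) (by exact_mod_cast hsl)
    rw [hcons, List.foldl_cons]
    have hsw : ((s : Int) + (w : Int)) = (((s + w : Nat)) : Int) := by push_cast; ring
    have hrow : PySem.List.slice full (some (s : Int)) (some ((s : Int) + (w : Int))) = cs.take w := by
      rw [hsw, PySem.List.slice_natCast, hdrop]
      congr 1
      omega
    have hcsne : cs ≠ [] := by
      rw [← hdrop]
      simp [List.drop_eq_nil_iff]
      omega
    have hn0 : 0 < n := by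
      rw [← hn]
      exact List.length_pos_iff.mpr hcsne
    simp only [hrow]
    by_cases hfull : w ≤ cs.length
    · have hlen : ((cs.take w).length : Int) = (w : Int) := by
        simp; omega
      rw [if_pos hlen]
      rw [hsw]
      rw [ih (cs.drop w).length (by simp; omega) (cs.drop w) (s + w) _ rfl
        (by rw [← List.drop_drop, hdrop])]
      rw [pvRows_big (by omega) hfull]
      simp [List.flatten_append, List.append_assoc]
    · push_neg at hfull
      have hlen : ¬ ((cs.take w).length : Int) = (w : Int) := by
        simp; omega
      rw [if_neg hlen]
      rw [hsw]
      rw [ih (cs.drop w).length (by simp; omega) (cs.drop w) (s + w) _ rfl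
        (by rw [← List.drop_drop, hdrop])]
      rw [List.take_of_length_le (by omega), pvRows_small hfull]
      have : cs.drop w = [] := by simp; omega
      rw [this, pvRows_small (by simpa using hw)]
      simp [List.flatten_append]

theorem pv_main (table : List Int) (tw : Int) (sp : List Int)
    (hpre : 0 < tw ∨ (table = [] ∧ tw ≠ 0)) :
    prepare_result table tw sp = prepare_result_alt table tw sp := by
  by_cases htab : table = []
  · subst htab
    have htw : tw ≠ 0 := hpre.elim (fun h => by omega) And.right
    have hnil : PySem.List.pyRange 0 0 tw = [] := by
      rcases lt_or_gt_of_ne htw with h | h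
      · rw [PySem.List.pyRange_of_neg _ _ h]; simp
      · rw [PySem.List.pyRange_of_pos _ _ h]; simp
    simp [prepare_result, prepare_result_alt, PySem.List.len_eq, PySem.List.pyRange_one_eq_nil,
      PySem.List.enumerate, hnil]
  · have htw : 0 < tw := hpre.resolve_right (fun h => absurd h.1 htab)
    have htw0 : tw ≠ 0 := by omega
    set W := tw.natAbs with hWdef
    have hW : 0 < W := Int.natAbs_pos.mpr htw0
    have htwW : tw = ((W : Nat) : Int) := by omega
    -- A side
    have hbody : (fun (result : List Char) (id : Int) =>
        let result := if id ∈ sp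
          then result ++ PySem.Int.toChars (PySem.List.pyGetD table id 0)
          else result ++ [' ']
        if PySem.Int.mod (id + 1) tw = 0 then result ++ ['\n'] else result) =
        (fun (result : List Char) (id : Int) => result ++
          ((if id ∈ sp then PySem.Int.toChars (PySem.List.pyGetD table id 0) else [' ']) ++
           (if PySem.Int.mod (id + 1) tw = 0 then ['\n'] else []))) := by
      funext result id
      dsimp only []
      split_ifs <;> simp
    have hA : prepare_result table tw sp = String.ofList
        ((PySem.List.enumerate table 0).flatMap (fun p =>
          (if p.1 ∈ sp then PySem.Int.toChars p.2 else [' ']) ++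
          (if PySem.Int.mod (p.1 + 1) tw = 0 then ['\n'] else []))) := by
      unfold prepare_result
      rw [hbody, PySem.List.foldl_append_eq_flatMap]
      rw [PySem.List.enumerate_eq_map_pyRange (d := 0), List.flatMap_map]
      simp [PySem.List.len_eq]
    rw [hA, pvA_rows tw htw0 sp table.length table 0 rfl le_rfl (dvd_zero tw)]
    -- B side
    unfold prepare_result_alt
    have hcells : (PySem.List.enumerate table).map
        (fun p => if p.1 ∈ PySem.Set.ofList sp then PySem.Int.toChars p.2 else [' ']) =
        (PySem.List.enumerate table 0).map
        (fun p => if p.1 ∈ sp then PySem.Int.toChars p.2 else [' ']) := by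
      apply List.map_congr_left
      intro p _
      by_cases h : p.1 ∈ sp
      · simp [PySem.Set.mem_ofList, h]
      · simp [PySem.Set.mem_ofList, h]
    dsimp only
    rw [hcells]
    set cells : List (List Char) := (PySem.List.enumerate table 0).map
        (fun p => if p.1 ∈ sp then PySem.Int.toChars p.2 else [' ']) with hcellsdef
    rw [htwW]
    have hfold := pvB_rows W hW cells cells.length cells 0 [] rfl rfl
    simp only [Nat.cast_zero] at hfold
    rw [PySem.List.len_eq]
    rw [hfold]
    simp

-- ===== VERDICT (by name: the statement is the Claim_ definition above) =====
theorem prepare_result_spec : Claim_equal_prepare_result := by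
  intro table table_width shortest_path _ hpre
  unfold Spec_prepare_result
  exact pv_main table table_width shortest_path hpre
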